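-- pv_equiv track=rewrite | github.com/jamielapointe/python_learning | src/CodeSignal/CodeArcade/Python/c009_mex_function.py | solution
-- ===== SOURCE A (Python) =====
-- def solution(s: list[int], upper_bound: int) -> int:
--     found = -1
--     for i in range(upper_bound):
--         if not i in s:
--             found = i
--             break
--     else:
--         found = upper_bound
--
--     return found
-- ===== SOURCE B (Python) =====
-- def solution(s: list[int], upper_bound: int) -> int:
--     expected = 0
--     for x in sorted(s):
--         if x == expected:
--             expected += 1
--         elif x > expected:
--             break
--     return min(expected, upper_bound)
-- ===== Notes on version B (the rewrite author's own statement) =====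
-- stated objective: alternative
-- what changed: Replaces the per-candidate membership scan over range(upper_bound) with a sort of s followed by a single counter pass (sort-based MEX), capped by min with upper_bound; it trades A's early-exit scans for a predictable O(n log n) pass.
import Mathlib
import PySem

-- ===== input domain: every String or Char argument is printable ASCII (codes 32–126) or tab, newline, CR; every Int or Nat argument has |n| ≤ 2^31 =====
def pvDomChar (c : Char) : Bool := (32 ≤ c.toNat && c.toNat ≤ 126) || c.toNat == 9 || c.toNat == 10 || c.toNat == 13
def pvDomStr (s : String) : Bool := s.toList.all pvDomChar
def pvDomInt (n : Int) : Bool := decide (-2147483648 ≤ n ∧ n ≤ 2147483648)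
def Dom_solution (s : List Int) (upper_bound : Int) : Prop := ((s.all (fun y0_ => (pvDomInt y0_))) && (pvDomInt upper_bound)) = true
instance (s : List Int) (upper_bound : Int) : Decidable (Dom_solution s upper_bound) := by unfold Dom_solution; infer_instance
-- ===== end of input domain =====

-- B replaces A's per-candidate membership scans over range(upper_bound) with a sort of s
-- and one counter pass (sort-based MEX), capped by min with upper_bound (alternative algorithm).

-- ===== PORT A =====
-- 'for i in range(upper_bound): if not i in s: found = i; break / else: found = upper_bound'
def solLoop (s : List Int) (ub : Int) : List Int → Int
  | [] => ub
  | i :: rest => if i ∉ s then i else solLoop s ub rest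

def solution (s : List Int) (upper_bound : Int) : Int :=
  solLoop s upper_bound (PySem.List.pyRange 0 upper_bound 1)

-- ===== PORT B =====
-- 'for x in sorted(s): if x == expected: expected += 1; elif x > expected: break'
def mexLoop : List Int → Int → Int
  | [], e => e
  | x :: rest, e => if x = e then mexLoop rest (e + 1) else if x > e then e else mexLoop rest e

def solution_alt (s : List Int) (upper_bound : Int) : Int :=
  min (mexLoop (PySem.List.sorted s (fun x => x) false) 0) upper_bound

-- ===== PRECONDITION & SPEC =====
def Spec_solution (s : List Int) (upper_bound : Int) (out : Int) : Prop := out = solution_alt s upper_bound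
instance (s : List Int) (upper_bound : Int) (out : Int) : Decidable (Spec_solution s upper_bound out) := by unfold Spec_solution; infer_instance

-- ===== CLAIM (what is proved, stated in full; the proofs are below) =====
def Claim_equal_solution : Prop := ∀ (s : List Int) (upper_bound : Int), Dom_solution s upper_bound → Spec_solution s upper_bound (solution s upper_bound)

-- ===== LEMMAS AND PROOFS =====

-- The counter pass computes the least value ≥ e missing from a sorted list.
theorem mexLoop_spec : ∀ (t : List Int) (e : Int), t.Pairwise (· ≤ ·) →
    e ≤ mexLoop t e ∧ mexLoop t e ∉ t ∧ ∀ k, e ≤ k → k < mexLoop t e → k ∈ t := by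
  intro t
  induction t with
  | nil => intro e _; exact ⟨le_rfl, by simp [mexLoop], fun k h1 h2 => absurd (lt_of_le_of_lt h1 h2) (by simp [mexLoop])⟩
  | cons x rest ih =>
    intro e hp
    have hrest : rest.Pairwise (· ≤ ·) := hp.of_cons
    by_cases hxe : x = e
    · have heq : mexLoop (x :: rest) e = mexLoop rest (e + 1) := by
        simp [mexLoop, hxe]
      obtain ⟨h1, h2, h3⟩ := ih (e + 1) hrest
      refine ⟨by omega, ?_, ?_⟩
      · rw [heq, List.mem_cons]
        rintro (h | h)
        · omega
        · exact h2 h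
      · intro k hk1 hk2
        rw [heq] at hk2
        rcases eq_or_lt_of_le hk1 with h | h
        · exact h ▸ hxe ▸ List.mem_cons_self
        · exact List.mem_cons_of_mem _ (h3 k (by omega) hk2)
    · by_cases hgt : x > e
      · -- break: result is e; no element of x::rest can equal e since all ≥ x > e
        have heq : mexLoop (x :: rest) e = e := by simp [mexLoop, hxe, hgt]
        have hall : ∀ y ∈ rest, x ≤ y := fun y hy => (List.pairwise_cons.mp hp).1 y hy
        refine ⟨by omega, ?_, fun k hk1 hk2 => absurd (lt_of_le_of_lt hk1 hk2) (by omega)⟩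
        rw [heq, List.mem_cons]
        rintro (h | h)
        · omega
        · have := hall e h; omega
      · -- x < e: skip
        have heq : mexLoop (x :: rest) e = mexLoop rest e := by simp [mexLoop, hxe, hgt]
        obtain ⟨h1, h2, h3⟩ := ih e hrest
        refine ⟨by omega, ?_, ?_⟩
        · rw [heq, List.mem_cons]
          rintro (h | h)
          · omega
          · exact h2 h
        · intro k hk1 hk2
          rw [heq] at hk2
          exact List.mem_cons_of_mem _ (h3 k hk1 hk2)

-- A's loop over range(j, ub) returns min m ub when m is the MEX and j ≤ m.
theorem solLoop_range (s : List Int) (ub m : Int)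
    (hnot : m ∉ s) (hall : ∀ k, 0 ≤ k → k < m → k ∈ s) :
    ∀ (n : Nat) (j : Int), (ub - j).toNat = n → 0 ≤ j → j ≤ m →
      solLoop s ub (PySem.List.pyRange j ub 1) = min m ub := by
  intro n
  induction n using Nat.strong_induction_on with
  | _ n ih =>
    intro j hn hj0 hjm
    by_cases hlt : j < ub
    · rw [PySem.List.pyRange_one_cons hlt]
      by_cases hmem : j ∈ s
      · have hjne : j ≠ m := fun h => hnot (h ▸ hmem)
        show (if j ∉ s then j else solLoop s ub (PySem.List.pyRange (j + 1) ub 1)) = min m ub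
        rw [if_neg (not_not_intro hmem)]
        exact ih (ub - (j + 1)).toNat (by omega) (j + 1) rfl (by omega) (by omega)
      · have hjm' : j = m := by
          by_contra h
          exact hmem (hall j hj0 (by omega))
        show (if j ∉ s then j else solLoop s ub (PySem.List.pyRange (j + 1) ub 1)) = min m ub
        rw [if_pos hmem]
        omega
    · have hemp : PySem.List.pyRange j ub 1 = [] := by
        rw [PySem.List.pyRange_one]
        have h0 : (ub - j).toNat = 0 := by omega
        simp [h0]
      rw [hemp]
      show ub = min m ub
      omega

-- ===== VERDICT (by name: the statement is the Claim_ definition above) =====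
theorem solution_spec : Claim_equal_solution := by
  intro s ub _
  unfold Spec_solution solution solution_alt
  set t := PySem.List.sorted s (fun x => x) false with ht
  have hperm : t.Perm s := PySem.List.sorted_perm s (fun x => x) false
  have hpair : t.Pairwise (· ≤ ·) := by
    simpa using PySem.List.sorted_pairwise s (fun x => x)
  obtain ⟨h0, hnot, hall⟩ := mexLoop_spec t 0 hpair
  exact solLoop_range s ub (mexLoop t 0)
    (fun h => hnot (hperm.mem_iff.mpr h))
    (fun k hk1 hk2 => hperm.mem_iff.mp (hall k hk1 hk2))
    (ub).toNat 0 (by omega) le_rfl h0
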